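-- pv_equiv track=rewrite | github.com/sinf/epever-2206an-scripts | modbus_thing/device.py | find_contiguous_ranges
-- ===== SOURCE A (Python) =====
-- def find_contiguous_ranges(numbers, max_delta, singles=[]):
--     start = 0
--     numbers = sorted(numbers)
--     for i in range(1,len(numbers)):
--         a = numbers[i-1]
--         b = numbers[i]
--         if (b-a > max_delta) or (a in singles) or (b in singles):
--             yield numbers[start:i]
--             start = i
--     if start <= len(numbers)-1:
--         yield numbers[start:]
-- ===== SOURCE B (Python) =====
-- def find_contiguous_ranges(numbers, max_delta, singles=[]):
--     group = []
--     for x in sorted(numbers):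
--         if group and (x - group[-1] > max_delta
--                       or group[-1] in singles or x in singles):
--             yield group
--             group = [x]
--         else:
--             group.append(x)
--     if group:
--         yield group
-- ===== Notes on version B (the rewrite author's own statement) =====
-- stated objective: simpler
-- what changed: A scans index pairs keeping a running start index and emits slices of the sorted list; B never indexes or slices: it folds over the sorted elements themselves, growing the current group element by element and emitting it when a break occurs.
import Mathlib
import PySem

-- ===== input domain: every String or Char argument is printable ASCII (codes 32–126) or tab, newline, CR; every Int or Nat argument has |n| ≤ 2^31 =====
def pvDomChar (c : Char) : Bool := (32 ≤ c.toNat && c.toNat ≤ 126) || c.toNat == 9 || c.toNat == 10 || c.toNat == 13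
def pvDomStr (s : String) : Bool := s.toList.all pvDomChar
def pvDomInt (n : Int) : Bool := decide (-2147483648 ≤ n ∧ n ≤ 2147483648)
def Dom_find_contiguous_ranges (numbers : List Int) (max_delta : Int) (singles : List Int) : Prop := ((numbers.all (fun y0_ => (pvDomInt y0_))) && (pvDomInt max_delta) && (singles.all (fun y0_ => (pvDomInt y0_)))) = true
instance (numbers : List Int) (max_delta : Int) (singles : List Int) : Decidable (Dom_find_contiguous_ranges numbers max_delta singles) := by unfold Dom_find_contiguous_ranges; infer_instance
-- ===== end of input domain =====

-- B replaces A's index scan (running `start` index, emitting slices of the sorted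
-- list) by an element-wise fold that grows the current group and emits it at each
-- break; no indexing or slicing at all. Objective: simpler.
-- Both ports materialise the generator's yields as a list.

-- ===== PORT A =====
-- literal transliteration of A: sort, fold over range(1, len) carrying (start, yields), final slice
def find_contiguous_ranges (numbers : List Int) (max_delta : Int) (singles : List Int) : List (List Int) :=
  let nums := PySem.List.sorted numbers (fun x => x) false
  let st := (PySem.List.pyRange 1 (PySem.List.len nums) 1).foldl
    (fun (st : Int × List (List Int)) i =>
      let a := PySem.List.pyGetD nums (i - 1) 0
      let b := PySem.List.pyGetD nums i 0
      if decide (b - a > max_delta) || singles.contains a || singles.contains b then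
        (i, st.2 ++ [PySem.List.slice nums (some st.1) (some i)])
      else st) (0, [])
  if st.1 ≤ PySem.List.len nums - 1 then
    st.2 ++ [PySem.List.slice nums (some st.1) none]
  else st.2

-- ===== PORT B =====
-- transliteration of B: fold over the sorted elements carrying (group, yields); final group if nonempty
def find_contiguous_ranges_alt (numbers : List Int) (max_delta : Int) (singles : List Int) : List (List Int) :=
  let st := (PySem.List.sorted numbers (fun x => x) false).foldl
    (fun (st : List Int × List (List Int)) x =>
      if !st.1.isEmpty &&
         (decide (x - PySem.List.pyGetD st.1 (-1) 0 > max_delta)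
          || singles.contains (PySem.List.pyGetD st.1 (-1) 0)
          || singles.contains x) then
        ([x], st.2 ++ [st.1])
      else (st.1 ++ [x], st.2)) ([], [])
  if !st.1.isEmpty then st.2 ++ [st.1] else st.2

-- ===== PRECONDITION & SPEC =====
def Spec_find_contiguous_ranges (numbers : List Int) (max_delta : Int) (singles : List Int) (out : List (List Int)) : Prop := out = find_contiguous_ranges_alt numbers max_delta singles
instance (numbers : List Int) (max_delta : Int) (singles : List Int) (out : List (List Int)) : Decidable (Spec_find_contiguous_ranges numbers max_delta singles out) := by unfold Spec_find_contiguous_ranges; infer_instance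

-- ===== CLAIM (what is proved, stated in full; the proofs are below) =====
def Claim_equal_find_contiguous_ranges : Prop := ∀ (numbers : List Int) (max_delta : Int) (singles : List Int), Dom_find_contiguous_ranges numbers max_delta singles → Spec_find_contiguous_ranges numbers max_delta singles (find_contiguous_ranges numbers max_delta singles)

-- ===== LEMMAS AND PROOFS =====

-- A's fold step and B's fold step, named so the invariant can be stated once
def pvStepA (nums singles : List Int) (max_delta : Int)
    (st : Int × List (List Int)) (i : Int) : Int × List (List Int) :=
  let a := PySem.List.pyGetD nums (i - 1) 0
  let b := PySem.List.pyGetD nums i 0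
  if decide (b - a > max_delta) || singles.contains a || singles.contains b then
    (i, st.2 ++ [PySem.List.slice nums (some st.1) (some i)])
  else st

def pvStepB (singles : List Int) (max_delta : Int)
    (st : List Int × List (List Int)) (x : Int) : List Int × List (List Int) :=
  if !st.1.isEmpty &&
     (decide (x - PySem.List.pyGetD st.1 (-1) 0 > max_delta)
      || singles.contains (PySem.List.pyGetD st.1 (-1) 0)
      || singles.contains x) then
    ([x], st.2 ++ [st.1])
  else (st.1 ++ [x], st.2)

-- joint invariant: after the first k elements, A's state (start s, yields) and
-- B's state (group = nums[s:k], yields) correspond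
theorem pvInv (nums singles : List Int) (max_delta : Int) (k : Nat)
    (hk : 1 ≤ k) (hle : k ≤ nums.length) :
    ∃ (s : Nat) (out : List (List Int)), s < k ∧
      (PySem.List.pyRange 1 (k : Int) 1).foldl (pvStepA nums singles max_delta) (0, [])
        = ((s : Int), out) ∧
      (nums.take k).foldl (pvStepB singles max_delta) ([], [])
        = ((nums.drop s).take (k - s), out) := by
  induction k with
  | zero => omega
  | succ k ih =>
    by_cases hk1 : k = 0
    · subst hk1
      refine ⟨0, [], by omega, ?_, ?_⟩
      · norm_num [PySem.List.pyRange]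
      · have hne : nums ≠ [] := by
          intro h; rw [h] at hle; simp at hle
        obtain ⟨x, xs, rfl⟩ := List.exists_cons_of_ne_nil hne
        simp [pvStepB, List.take_succ]
    · obtain ⟨s, out, hs, hA, hB⟩ := ih (by omega) (by omega)
      have hklen : k < nums.length := by omega
      have hk1len : k - 1 < nums.length := by omega
      -- the two break tests agree: the group's last element is nums[k-1]
      have hgrouplen : ((nums.drop s).take (k - s)).length = k - s := by
        simp; omega
      have hgne : ((nums.drop s).take (k - s)) ≠ [] := by
        intro h; rw [h] at hgrouplen; simp at hgrouplen; omega
      have hlast : PySem.List.pyGetD ((nums.drop s).take (k - s)) (-1) 0 = nums[k-1] := by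
        rw [PySem.List.pyGetD_neg_one _ _ hgne]
        rw [List.getLast_eq_getElem]
        simp only [hgrouplen]
        rw [List.getElem_take, List.getElem_drop]
        congr 1; omega
      have hrange : PySem.List.pyRange 1 ((k : Int) + 1) 1
          = PySem.List.pyRange 1 (k : Int) 1 ++ [(k : Int)] := by
        exact PySem.List.pyRange_one_succ_right
          (by exact_mod_cast Nat.one_le_iff_ne_zero.mpr hk1)
      have hget1 : PySem.List.pyGetD nums ((k : Int) - 1) 0 = nums[k-1] := by
        have h : ((k : Int) - 1) = ((k - 1 : Nat) : Int) := by omega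
        rw [h, PySem.List.pyGetD_natCast]
        exact List.getD_eq_getElem _ _ hk1len
      have hgetk : PySem.List.pyGetD nums (k : Int) 0 = nums[k] := by
        rw [PySem.List.pyGetD_natCast]
        exact List.getD_eq_getElem _ _ hklen
      have htake : nums.take (k + 1) = nums.take k ++ [nums[k]] := by
        rw [List.take_succ]
        simp [List.getElem?_eq_getElem hklen]
      push_cast
      rw [hrange, List.foldl_append, hA, List.foldl_cons, List.foldl_nil,
          htake, List.foldl_append, hB, List.foldl_cons, List.foldl_nil]
      by_cases hc : (decide (nums[k] - nums[k-1] > max_delta)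
          || singles.contains nums[k-1] || singles.contains nums[k]) = true
      · refine ⟨k, out ++ [(nums.drop s).take (k - s)], by omega, ?_, ?_⟩
        · simp only [pvStepA, hget1, hgetk]
          rw [if_pos hc]
          rw [PySem.List.slice_natCast nums s k]
        · simp only [pvStepB, hlast]
          rw [if_pos (by simp [hgne]; simpa using hc)]
          have h1 : (nums.drop k).take (k + 1 - k) = [nums[k]] := by
            have he : k + 1 - k = 1 := by omega
            rw [he, List.take_one]
            simp [List.head?_drop, List.getElem?_eq_getElem hklen]
          rw [h1]
      · refine ⟨s, out, by omega, ?_, ?_⟩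
        · simp only [pvStepA, hget1, hgetk]
          rw [if_neg hc]
        · simp only [pvStepB, hlast]
          rw [if_neg (by simp [hgne]; simpa using hc)]
          simp only [Prod.mk.injEq, and_true]
          rw [show k + 1 - s = (k - s) + 1 from by omega, List.take_succ]
          congr 1
          rw [List.getElem?_eq_getElem (by simp; omega)]
          simp only [Option.toList_some, List.getElem_drop,
            show s + (k - s) = k from by omega]

-- ===== VERDICT (by name: the statement is the Claim_ definition above) =====
theorem find_contiguous_ranges_spec : Claim_equal_find_contiguous_ranges := by
  intro numbers max_delta singles _
  unfold Spec_find_contiguous_ranges find_contiguous_ranges find_contiguous_ranges_alt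
  set nums := PySem.List.sorted numbers (fun x => x) false with hnums
  by_cases hE : nums = []
  · rw [hE]; simp [PySem.List.len, PySem.List.pyRange, pvStepA, pvStepB]
  · have hlen : 1 ≤ nums.length := by
      have := List.length_pos_of_ne_nil hE; omega
    obtain ⟨s, out, hs, hA, hB⟩ := pvInv nums singles max_delta nums.length hlen le_rfl
    have hlenEq : PySem.List.len nums = (nums.length : Int) := PySem.List.len_eq nums
    have hA' : (PySem.List.pyRange 1 (PySem.List.len nums) 1).foldl (pvStepA nums singles max_delta) (0, []) = ((s : Int), out) := by
      rw [hlenEq]; exact hA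
    have hB' : nums.foldl (pvStepB singles max_delta) ([], [])
        = (nums.drop s, out) := by
      have := hB
      rw [List.take_length] at this
      rw [this]
      congr 1
      exact List.take_of_length_le (by simp)
    show (let st := (PySem.List.pyRange 1 (PySem.List.len nums) 1).foldl _ (0, []);
          if st.1 ≤ PySem.List.len nums - 1 then st.2 ++ [PySem.List.slice nums (some st.1) none] else st.2)
        = (let st := nums.foldl _ ([], []); if !st.1.isEmpty then st.2 ++ [st.1] else st.2)
    rw [show ((PySem.List.pyRange 1 (PySem.List.len nums) 1).foldl
        (fun (st : Int × List (List Int)) i =>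
          let a := PySem.List.pyGetD nums (i - 1) 0
          let b := PySem.List.pyGetD nums i 0
          if decide (b - a > max_delta) || singles.contains a || singles.contains b then
            (i, st.2 ++ [PySem.List.slice nums (some st.1) (some i)])
          else st) (0, [])) = ((s : Int), out) from hA']
    rw [show (nums.foldl
        (fun (st : List Int × List (List Int)) x =>
          if !st.1.isEmpty &&
             (decide (x - PySem.List.pyGetD st.1 (-1) 0 > max_delta)
              || singles.contains (PySem.List.pyGetD st.1 (-1) 0)
              || singles.contains x) then
            ([x], st.2 ++ [st.1])
          else (st.1 ++ [x], st.2)) ([], [])) = (nums.drop s, out) from hB']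
    have hdropne : nums.drop s ≠ [] := by
      intro h
      have := congrArg List.length h
      simp at this; omega
    simp only [hlenEq]
    rw [if_pos (by omega), if_pos (by simp [List.isEmpty_eq_false_iff, hdropne])]
    rw [PySem.List.slice_from_natCast]
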